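-- pv_equiv track=rewrite | github.com/adamluo1995/ByteDance-Campus-Challenge | 0311.py | func
-- ===== SOURCE A (Python) =====
-- def func(n, d):
--     p = [0] * n
--     d.sort(key=lambda x: x[0])
--     for i in range(1, n):
--         p[i] = max(0, d[i-1][1] - d[i][0] + d[i-1][0] + p[i-1])
--     max_v = 0
--     for i in range(n):
--         max_v = max(p[i]+d[i][1], max_v)
--     ft = p[n-1] + d[n-1][1] + d[n-1][0]
--     return ft, max_v
-- ===== SOURCE B (Python) =====
-- def func(n, d):
--     # Prefix-sum reformulation: unroll A's clamped recurrence
--     # p[i] = max(0, d[i-1][1]-d[i][0]+d[i-1][0]+p[i-1]) into p[i] = t[i] - min_{j<=i} t[j],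
--     # where t[i] is the plain prefix sum of the gap terms g[k] = d[k][0]+d[k][1]-d[k+1][0].
--     d.sort(key=lambda x: x[0])
--     t = [0]
--     for i in range(1, n):
--         t.append(t[-1] + d[i-1][0] + d[i-1][1] - d[i][0])
--     m = [0]
--     for x in t[1:]:
--         m.append(min(m[-1], x))
--     max_v = max(0, max(t[i] - m[i] + d[i][1] for i in range(n)))
--     ft = t[n-1] - m[n-1] + d[n-1][1] + d[n-1][0]
--     return ft, max_v
-- ===== Notes on version B (the rewrite author's own statement) =====
-- stated objective: alternative
-- what changed: B replaces A's clamped DP recurrence (p[i] = max(0, gap + p[i-1])) by plain prefix sums of the gap terms plus a running-minimum list, using the identity p[i] = t[i] - min_{j<=i} t[j], and takes the answer maximum over that closed form.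
import Mathlib
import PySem

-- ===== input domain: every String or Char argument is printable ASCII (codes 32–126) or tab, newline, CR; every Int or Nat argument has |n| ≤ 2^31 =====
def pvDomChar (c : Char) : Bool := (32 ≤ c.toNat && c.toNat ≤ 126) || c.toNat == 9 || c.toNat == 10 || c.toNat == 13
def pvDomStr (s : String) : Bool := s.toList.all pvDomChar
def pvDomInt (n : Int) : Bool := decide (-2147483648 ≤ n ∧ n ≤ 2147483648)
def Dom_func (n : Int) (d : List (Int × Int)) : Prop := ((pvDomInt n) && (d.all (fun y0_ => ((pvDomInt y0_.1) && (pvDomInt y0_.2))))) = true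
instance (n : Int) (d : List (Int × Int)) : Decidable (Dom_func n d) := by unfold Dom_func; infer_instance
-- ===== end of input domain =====

-- B replaces A's clamped DP recurrence by plain prefix sums plus a running-minimum list
-- (p[i] = t[i] - min_{j<=i} t[j]) — a different formulation of the same quantity (alternative).
-- Both A and B sort the argument d in place (same observable mutation); the equivalence proved is about the return value.

-- ===== PORT A =====
-- loop body of 'for i in range(1, n): p[i] = max(0, d[i-1][1] - d[i][0] + d[i-1][0] + p[i-1])'
def stepA (s : List (Int × Int)) (p : List Int) (i : Int) : List Int :=
  PySem.List.pySetD p i (max 0 ((PySem.List.pyGetD s (i-1) (0,0)).2 - (PySem.List.pyGetD s i (0,0)).1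
    + (PySem.List.pyGetD s (i-1) (0,0)).1 + PySem.List.pyGetD p (i-1) 0))

-- loop body of 'for i in range(n): max_v = max(p[i]+d[i][1], max_v)'
def stepM (s : List (Int × Int)) (p : List Int) (mv : Int) (i : Int) : Int :=
  max (PySem.List.pyGetD p i 0 + (PySem.List.pyGetD s i (0,0)).2) mv

def func (n : Int) (d : List (Int × Int)) : Int × Int :=
  let p0 : List Int := List.replicate n.toNat 0
  let s := PySem.List.sorted d (fun x => x.1) false
  let p := (PySem.List.pyRange 1 n 1).foldl (stepA s) p0
  let max_v := (PySem.List.pyRange 0 n 1).foldl (stepM s p) 0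
  let ft := PySem.List.pyGetD p (n-1) 0 + (PySem.List.pyGetD s (n-1) (0,0)).2 + (PySem.List.pyGetD s (n-1) (0,0)).1
  (ft, max_v)

-- ===== PORT B =====
-- loop body of 't.append(t[-1] + d[i-1][0] + d[i-1][1] - d[i][0])'
def stepT (s : List (Int × Int)) (acc : List Int) (i : Int) : List Int :=
  acc ++ [PySem.List.pyGetD acc (-1) 0 + (PySem.List.pyGetD s (i-1) (0,0)).1
    + (PySem.List.pyGetD s (i-1) (0,0)).2 - (PySem.List.pyGetD s i (0,0)).1]

-- loop body of 'm.append(min(m[-1], x))'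
def stepMin (acc : List Int) (x : Int) : List Int :=
  acc ++ [min (PySem.List.pyGetD acc (-1) 0) x]

def func_alt (n : Int) (d : List (Int × Int)) : Int × Int :=
  let s := PySem.List.sorted d (fun x => x.1) false
  let t := (PySem.List.pyRange 1 n 1).foldl (stepT s) [0]
  let m := (PySem.List.slice t (some 1) none).foldl stepMin [0]
  -- 'max(0, max(gen))'; the inner max over the generator (nonempty under Pre_) is maxD
  let max_v := max 0 (PySem.List.maxD
    ((PySem.List.pyRange 0 n 1).map (fun i =>
      PySem.List.pyGetD t i 0 - PySem.List.pyGetD m i 0 + (PySem.List.pyGetD s i (0,0)).2))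
    (fun x => x) 0)
  let ft := PySem.List.pyGetD t (n-1) 0 - PySem.List.pyGetD m (n-1) 0
    + (PySem.List.pyGetD s (n-1) (0,0)).2 + (PySem.List.pyGetD s (n-1) (0,0)).1
  (ft, max_v)

-- ===== PRECONDITION & SPEC =====
-- Pre_ excludes exactly the inputs where A raises IndexError: n ≤ 0 (p[-1] on an empty p) or n > len(d) (d[i] out of range).
def Pre_func (n : Int) (d : List (Int × Int)) : Prop := 1 ≤ n ∧ n ≤ (d.length : Int)
instance (n : Int) (d : List (Int × Int)) : Decidable (Pre_func n d) := by unfold Pre_func; infer_instance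
def pvWitness_func : Int × (List (Int × Int)) := (2, [(3, 1), (1, 2), (2, 5)])

def Spec_func (n : Int) (d : List (Int × Int)) (out : Int × Int) : Prop := out = func_alt n d
instance (n : Int) (d : List (Int × Int)) (out : Int × Int) : Decidable (Spec_func n d out) := by unfold Spec_func; infer_instance

-- ===== CLAIM (what is proved, stated in full; the proofs are below) =====
def Claim_equal_func : Prop := ∀ (n : Int) (d : List (Int × Int)), Dom_func n d → Pre_func n d → Spec_func n d (func n d)

-- ===== LEMMAS AND PROOFS =====

-- the mathematical value of A's p[j]
def qv (s : List (Int × Int)) : Nat → Int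
  | 0 => 0
  | j+1 => max 0 ((s.getD j (0,0)).2 - (s.getD (j+1) (0,0)).1 + (s.getD j (0,0)).1 + qv s j)

-- B's prefix sums t[j] and running minima m[j]
def tval (s : List (Int × Int)) : Nat → Int
  | 0 => 0
  | j+1 => tval s j + (s.getD j (0,0)).1 + (s.getD j (0,0)).2 - (s.getD (j+1) (0,0)).1

def mval (s : List (Int × Int)) : Nat → Int
  | 0 => 0
  | j+1 => min (mval s j) (tval s (j+1))

lemma qv_eq (s : List (Int × Int)) : ∀ j : Nat, qv s j = tval s j - mval s j := by
  intro j
  induction j with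
  | zero => simp [qv, tval, mval]
  | succ j ih => simp only [qv, tval, mval]; omega

lemma qv_succ (s : List (Int × Int)) (k : Nat) (hk : 1 ≤ k) :
    qv s k = max 0 ((s.getD (k-1) (0,0)).2 - (s.getD k (0,0)).1 + (s.getD (k-1) (0,0)).1 + qv s (k-1)) := by
  cases k with
  | zero => omega
  | succ j => simp [qv]

lemma lemA (s : List (Int × Int)) (m : Nat) :
    ∀ k : Nat, 1 ≤ k → k ≤ m →
      (PySem.List.pyRange 1 (k : Int) 1).foldl (stepA s) (List.replicate m 0)
        = (List.range m).map (fun j => if j < k then qv s j else 0) := by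
  intro k hk1 hkm
  induction k with
  | zero => omega
  | succ k ih =>
    rcases Nat.eq_or_lt_of_le hk1 with h1 | h1
    · have hk0 : k = 0 := by omega
      subst hk0
      rw [show ((1 : Nat) : Int) = 1 by norm_num, PySem.List.pyRange_one_eq_nil le_rfl]
      simp only [List.foldl_nil]
      apply List.ext_getElem (by simp)
      intro i hi1 hi2
      simp only [List.getElem_replicate, List.getElem_map, List.getElem_range]
      split_ifs with h
      · obtain rfl : i = 0 := by omega
        simp [qv]
      · rfl
    · have hk1' : 1 ≤ k := by omega
      have hkm' : k ≤ m := by omega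
      have hcast : ((k + 1 : Nat) : Int) = (k : Int) + 1 := by push_cast; ring
      rw [hcast, PySem.List.pyRange_one_succ_right (by exact_mod_cast hk1'),
          List.foldl_append, ih hk1' hkm']
      simp only [List.foldl_cons, List.foldl_nil]
      unfold stepA
      have hsub : (k : Int) - 1 = ((k - 1 : Nat) : Int) := by omega
      rw [hsub]
      simp only [PySem.List.pyGetD_natCast, PySem.List.pySetD_natCast]
      rw [PySem.List.getD_map_range _ m (k-1) 0 (by omega)]
      rw [if_pos (by omega : k - 1 < k)]
      apply List.ext_getElem (by simp)
      intro i hi1 hi2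
      have hlen : i < ((List.range m).map (fun j => if j < k then qv s j else 0)).length := by
        simpa using (by simpa using hi2 : i < m)
      rw [List.getElem_set]
      simp only [List.getElem_map, List.getElem_range]
      by_cases hik : k = i
      · subst hik
        rw [if_pos rfl, if_pos (by omega), qv_succ s k hk1']
      · rw [if_neg hik]
        by_cases hlt : i < k
        · rw [if_pos hlt, if_pos (by omega)]
        · rw [if_neg hlt, if_neg (by omega)]

lemma lemT (s : List (Int × Int)) :
    ∀ k : Nat, 1 ≤ k →
      (PySem.List.pyRange 1 (k : Int) 1).foldl (stepT s) [0]
        = (List.range k).map (tval s) := by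
  intro k hk1
  induction k with
  | zero => omega
  | succ k ih =>
    rcases Nat.eq_or_lt_of_le hk1 with h1 | h1
    · have hk0 : k = 0 := by omega
      subst hk0
      rw [show ((1 : Nat) : Int) = 1 by norm_num, PySem.List.pyRange_one_eq_nil le_rfl]
      simp [tval]
    · have hk1' : 1 ≤ k := by omega
      have hcast : ((k + 1 : Nat) : Int) = (k : Int) + 1 := by push_cast; ring
      rw [hcast, PySem.List.pyRange_one_succ_right (by exact_mod_cast hk1'),
          List.foldl_append, ih hk1']
      simp only [List.foldl_cons, List.foldl_nil]
      unfold stepT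
      obtain ⟨j, rfl⟩ : ∃ j, k = j + 1 := ⟨k - 1, by omega⟩
      have hsub : ((j + 1 : Nat) : Int) - 1 = ((j : Nat) : Int) := by push_cast; ring
      rw [hsub]
      simp only [PySem.List.pyGetD_natCast]
      simp [List.range_succ, PySem.List.pyGetD_neg_one_append_singleton, tval]
lemma lemM (s : List (Int × Int)) :
    ∀ k : Nat, 1 ≤ k →
      (((List.range k).map (tval s)).tail).foldl stepMin [0]
        = (List.range k).map (mval s) := by
  intro k hk1
  induction k with
  | zero => omega
  | succ k ih =>
    rcases Nat.eq_or_lt_of_le hk1 with h1 | h1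
    · have hk0 : k = 0 := by omega
      subst hk0
      simp [mval]
    · have hk1' : 1 ≤ k := by omega
      have hne : (List.range k).map (tval s) ≠ [] := by
        simp [List.map_eq_nil_iff, List.range_eq_nil]; omega
      rw [List.range_succ, List.map_append, List.map_cons, List.map_nil,
          List.tail_append_of_ne_nil hne, List.foldl_append, ih hk1']
      simp only [List.foldl_cons, List.foldl_nil]
      unfold stepMin
      obtain ⟨j, rfl⟩ : ∃ j, k = j + 1 := ⟨k - 1, by omega⟩
      simp [List.range_succ, PySem.List.pyGetD_neg_one_append_singleton, mval]

-- max(0, max(L)) (with default 0 on an empty L) is the running max fold starting at 0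
lemma max_maxD_eq_foldl (L : List Int) :
    max 0 (PySem.List.maxD L (fun x => x) 0) = L.foldl max 0 := by
  cases hL : PySem.List.max? L (fun x : Int => x) with
  | none =>
    have : L = [] := (PySem.List.max?_eq_none_iff L fun x => x).mp hL
    subst this
    simp [PySem.List.maxD, hL]
  | some x =>
    have hmem := PySem.List.max?_mem hL
    have hmax := PySem.List.max?_isMax hL
    have h1 := PySem.List.le_foldl_max L 0
    have h2 := PySem.List.foldl_max_mem L 0
    have hxF : x ≤ L.foldl max 0 := h1.2 x hmem
    rcases h2 with h0 | hmemF
    · have : x ≤ 0 := by rw [h0] at hxF; exact hxF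
      simp [PySem.List.maxD, hL]
      omega
    · have hFx : L.foldl max 0 ≤ x := hmax _ hmemF
      simp [PySem.List.maxD, hL]
      omega

-- ===== VERDICT (by name: the statement is the Claim_ definition above) =====
theorem func_spec : Claim_equal_func := by
  intro n d _ hpre
  obtain ⟨h1, h2⟩ := hpre
  unfold Spec_func func func_alt
  set s := PySem.List.sorted d (fun x => x.1) false with hsdef
  have hn : ((n.toNat : Nat) : Int) = n := Int.toNat_of_nonneg (by omega)
  set m := n.toNat with hmdef
  have hm1 : 1 ≤ m := by omega
  have hA := lemA s m m hm1 le_rfl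
  have hT := lemT s m hm1
  have hM := lemM s m hm1
  rw [← hn] at *
  simp only []
  rw [hA, hT, PySem.List.slice_from_one, hM]
  have hsub : ((m : Int)) - 1 = ((m - 1 : Nat) : Int) := by omega
  rw [hsub]
  simp only [PySem.List.pyGetD_natCast]
  rw [PySem.List.getD_map_range _ m (m-1) 0 (by omega),
      PySem.List.getD_map_range (tval s) m (m-1) 0 (by omega),
      PySem.List.getD_map_range (mval s) m (m-1) 0 (by omega),
      if_pos (by omega : m - 1 < m)]
  rw [Prod.mk.injEq]
  refine ⟨?_, ?_⟩
  · -- ft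
    rw [qv_eq]
  · -- max_v
    have hmapeq :
        (PySem.List.pyRange 0 (m : Int) 1).map (fun i =>
            PySem.List.pyGetD ((List.range m).map (tval s)) i 0
              - PySem.List.pyGetD ((List.range m).map (mval s)) i 0
              + (PySem.List.pyGetD s i (0,0)).2)
          = (PySem.List.pyRange 0 (m : Int) 1).map (fun i =>
              PySem.List.pyGetD ((List.range m).map (fun j => if j < m then qv s j else 0)) i 0
                + (PySem.List.pyGetD s i (0,0)).2) := by
      apply List.map_congr_left
      intro i hi
      rw [PySem.List.mem_pyRange_one] at hi
      obtain ⟨j, rfl⟩ : ∃ j : Nat, (j : Int) = i := ⟨i.toNat, by omega⟩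
      have hjm : j < m := by omega
      simp only [PySem.List.pyGetD_natCast]
      rw [PySem.List.getD_map_range (tval s) m j 0 hjm,
          PySem.List.getD_map_range (mval s) m j 0 hjm,
          PySem.List.getD_map_range _ m j 0 hjm,
          if_pos hjm, qv_eq]
    rw [hmapeq, max_maxD_eq_foldl]
    have hfun : stepM s ((List.range m).map (fun j => if j < m then qv s j else 0))
        = fun mv i => max mv (PySem.List.pyGetD ((List.range m).map (fun j => if j < m then qv s j else 0)) i 0
            + (PySem.List.pyGetD s i (0,0)).2) := by
      funext mv i
      unfold stepM
      exact max_comm _ _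
    rw [hfun, List.foldl_map]
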